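-- pv_equiv track=rewrite | github.com/snipexx122/Bike_Index_Challenge | spark/app/Data_Ingestion_script/Data_Ingestion.py | __generate_colors_string
-- ===== SOURCE A (Python) =====
-- def __generate_colors_string(colors):
--     color_string = ""
--     colors_fixed = []
--
--     if colors !="":
--         colors_fixed = colors.split(",")
--
--     for i in range(0,len(colors_fixed)):
--
--         color_string = color_string + colors_fixed[i]
--
--         if i !=len(colors_fixed)-1:
--             color_string = color_string + "%2C"
--
--     return color_string
-- ===== SOURCE B (Python) =====
-- def __generate_colors_string(colors):
--     return colors.replace(",", "%2C")
-- ===== Notes on version B (the rewrite author's own statement) =====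
-- stated objective: idiomatic
-- what changed: The split-into-list / index-loop / conditional-separator rejoin is replaced by a single direct str.replace of ',' by '%2C' with no list and no loop.
import Mathlib
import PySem

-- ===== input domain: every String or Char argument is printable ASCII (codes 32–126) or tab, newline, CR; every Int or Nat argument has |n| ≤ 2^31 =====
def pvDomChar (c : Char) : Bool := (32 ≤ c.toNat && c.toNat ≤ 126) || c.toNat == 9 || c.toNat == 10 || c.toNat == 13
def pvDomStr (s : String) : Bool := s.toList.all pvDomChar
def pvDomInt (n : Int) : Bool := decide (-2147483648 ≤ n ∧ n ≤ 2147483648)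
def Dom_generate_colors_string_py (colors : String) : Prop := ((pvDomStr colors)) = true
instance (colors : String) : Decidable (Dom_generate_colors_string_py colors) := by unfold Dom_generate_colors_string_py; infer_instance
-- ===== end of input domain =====

-- B replaces A's split / index-loop / conditional-separator rejoin by a single str.replace of "," with "%2C" (idiomatic; return value proved equal on the whole domain).


-- ===== PORT A =====
-- literal port of A: colors_fixed = colors.split(",") unless colors == "", then an
-- index loop over range(0, len(colors_fixed)) appending the piece and "%2C" except after the last
def generate_colors_string_py (colors : String) : String :=
  let colors_fixed : List String :=
    if colors ≠ "" then (PySem.Str.split? colors ",").getD [] else []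
  (PySem.List.pyRange 0 (colors_fixed.length : Int) 1).foldl
    (fun color_string i =>
      let color_string := color_string ++ ((PySem.List.pyGet? colors_fixed i).getD "")
      if i ≠ (colors_fixed.length : Int) - 1 then color_string ++ "%2C" else color_string)
    ""

-- ===== PORT B =====
-- literal port of B: return colors.replace(",", "%2C")
def generate_colors_string_py_alt (colors : String) : String :=
  PySem.Str.replace colors "," "%2C"

-- ===== PRECONDITION & SPEC =====
def Spec_generate_colors_string_py (colors : String) (out : String) : Prop := out = generate_colors_string_py_alt colors
instance (colors : String) (out : String) : Decidable (Spec_generate_colors_string_py colors out) := by unfold Spec_generate_colors_string_py; infer_instance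

-- ===== CLAIM (what is proved, stated in full; the proofs are below) =====
def Claim_equal_generate_colors_string_py : Prop := ∀ (colors : String), Dom_generate_colors_string_py colors → Spec_generate_colors_string_py colors (generate_colors_string_py colors)

-- ===== LEMMAS AND PROOFS =====

-- the common normal form of both programs: each ',' becomes "%2C", all other chars stay
def pvSubst (cs : List Char) : List Char :=
  cs.flatMap (fun c => if c = ',' then "%2C".toList else [c])

-- structural mirror of splitting on the single character ','
def pvSplit : List Char → List (List Char)
  | [] => [[]]
  | c :: t => if c = ',' then [] :: pvSplit t else (pvSplit t).modifyHead (c :: ·)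

-- the separator-except-after-last join that A's loop computes over the pieces
def pvJoin : List String → String
  | [] => ""
  | [x] => x
  | x :: y :: r => x ++ "%2C" ++ pvJoin (y :: r)

theorem pvSplit_ne_nil (cs : List Char) : pvSplit cs ≠ [] := by
  cases cs with
  | nil => simp [pvSplit]
  | cons c t =>
    simp only [pvSplit]
    split_ifs
    · simp
    · cases h : pvSplit t with
      | nil => exact absurd h (pvSplit_ne_nil t)
      | cons x r => simp [List.modifyHead]

theorem pvSplit_cons' (cs : List Char) : ∃ x r, pvSplit cs = x :: r := by
  cases hs : pvSplit cs with
  | nil => exact absurd hs (pvSplit_ne_nil cs)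
  | cons x r => exact ⟨x, r, rfl⟩

theorem pv_replace_go (fuel : Nat) (l acc : List Char) (h : l.length ≤ fuel) :
    PySem.Chars.replace.go [','] "%2C".toList fuel l acc = acc.reverse ++ pvSubst l := by
  induction fuel generalizing l acc with
  | zero =>
    have : l = [] := List.length_eq_zero_iff.mp (Nat.le_zero.mp h)
    subst this
    simp [PySem.Chars.replace.go, pvSubst]
  | succ n ih =>
    cases l with
    | nil => simp [PySem.Chars.replace.go, pvSubst]
    | cons c t =>
      simp only [PySem.Chars.replace.go]
      by_cases hc : c = ','
      · subst hc
        rw [if_pos (by simp [List.isPrefixOf])]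
        rw [ih _ _ (by simpa using h)]
        simp [pvSubst]
      · rw [if_neg (by simp [List.isPrefixOf]; exact fun h' => hc h'.symm)]
        rw [ih _ _ (by simpa using Nat.le_of_succ_le_succ h)]
        simp [pvSubst, hc]

theorem pv_replace_eq (cs : List Char) :
    PySem.Chars.replace cs [','] "%2C".toList = pvSubst cs := by
  rw [PySem.Chars.replace]
  rw [if_neg (by simp)]
  exact pv_replace_go _ _ _ (by omega)

theorem pv_splitOn_go (fuel : Nat) (l cur : List Char) (acc : List (List Char))
    (h : l.length ≤ fuel) :
    PySem.Chars.splitOn.go [','] fuel l cur acc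
      = acc.reverse ++ (pvSplit l).modifyHead (cur.reverse ++ ·) := by
  induction fuel generalizing l cur acc with
  | zero =>
    have : l = [] := List.length_eq_zero_iff.mp (Nat.le_zero.mp h)
    subst this
    simp [PySem.Chars.splitOn.go, pvSplit, List.modifyHead]
  | succ n ih =>
    cases l with
    | nil => simp [PySem.Chars.splitOn.go, pvSplit, List.modifyHead]
    | cons c t =>
      simp only [PySem.Chars.splitOn.go]
      by_cases hc : c = ','
      · subst hc
        rw [if_pos (by simp [List.isPrefixOf])]
        rw [ih _ _ _ (by simpa using h)]
        simp only [pvSplit, List.modifyHead]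
        obtain ⟨x, r, hx⟩ := pvSplit_cons' t
        simp [hx]
      · rw [if_neg (by simp [List.isPrefixOf]; exact fun h' => hc h'.symm)]
        rw [ih _ _ _ (by simpa using Nat.le_of_succ_le_succ h)]
        simp only [pvSplit, if_neg hc]
        obtain ⟨x, r, hx⟩ := pvSplit_cons' t
        simp [hx, List.modifyHead]

theorem pv_splitOn_eq (cs : List Char) :
    PySem.Chars.splitOn cs [','] = pvSplit cs := by
  rw [PySem.Chars.splitOn]
  rw [pv_splitOn_go _ _ _ _ (by omega)]
  obtain ⟨x, r, hx⟩ := pvSplit_cons' cs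
  simp [hx, List.modifyHead]

theorem pv_intercalate_cons (sep x y : List Char) (r : List (List Char)) :
    List.intercalate sep (x :: y :: r) = x ++ sep ++ List.intercalate sep (y :: r) := by
  unfold List.intercalate
  simp [List.intersperse]

theorem pv_intercalate_split (cs : List Char) :
    List.intercalate "%2C".toList (pvSplit cs) = pvSubst cs := by
  induction cs with
  | nil => simp [pvSplit, pvSubst, List.intercalate]
  | cons c t ih =>
    simp only [pvSplit]
    obtain ⟨x, r, hx⟩ := pvSplit_cons' t
    by_cases hc : c = ','
    · subst hc
      rw [if_pos rfl, hx, pv_intercalate_cons, ← hx, ih]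
      simp [pvSubst]
    · rw [if_neg hc, hx]
      simp only [List.modifyHead]
      have h2 : List.intercalate "%2C".toList ((c :: x) :: r)
          = c :: List.intercalate "%2C".toList (x :: r) := by
        cases r with
        | nil => simp [List.intercalate]
        | cons y s => rw [pv_intercalate_cons, pv_intercalate_cons]; simp
      rw [h2, ← hx, ih]
      simp [pvSubst, hc]

theorem pvJoin_toList (ps : List String) :
    (pvJoin ps).toList = List.intercalate "%2C".toList (ps.map String.toList) := by
  induction ps with
  | nil => simp [pvJoin, List.intercalate]
  | cons x t ih =>
    cases t with
    | nil => simp [pvJoin, List.intercalate]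
    | cons y r =>
      rw [show pvJoin (x :: y :: r) = x ++ "%2C" ++ pvJoin (y :: r) from rfl]
      simp only [List.map_cons]
      rw [pv_intercalate_cons]
      rw [← List.map_cons, ← ih]
      simp [String.toList_append]

-- A's index loop joins the remaining pieces with "%2C"
theorem pv_loopA (ps : List String) (k a : Nat) (acc : String) (hk : a + k = ps.length) :
    (PySem.List.pyRange (a : Int) (ps.length : Int) 1).foldl
      (fun color_string i =>
        let color_string := color_string ++ ((PySem.List.pyGet? ps i).getD "")
        if i ≠ (ps.length : Int) - 1 then color_string ++ "%2C" else color_string) acc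
    = acc ++ pvJoin (ps.drop a) := by
  induction k generalizing a acc with
  | zero =>
    have ha : a = ps.length := by omega
    subst ha
    rw [PySem.List.pyRange_one_eq_nil (le_refl _)]
    simp [pvJoin, String.append_empty]
  | succ k ih =>
    have halt : a < ps.length := by omega
    rw [PySem.List.pyRange_one_cons (by exact_mod_cast halt)]
    simp only [List.foldl_cons]
    rw [PySem.List.pyGet?_natCast, List.getElem?_eq_getElem halt]
    by_cases hlast : a + 1 = ps.length
    · have hcond : ¬ ((a : Int) ≠ (ps.length : Int) - 1) := by omega
      rw [if_neg hcond]
      rw [show ((a : Int) + 1) = ((ps.length : Nat) : Int) from by omega]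
      rw [PySem.List.pyRange_one_eq_nil (le_refl _)]
      simp only [List.foldl_nil, Option.getD_some]
      rw [List.drop_eq_getElem_cons halt]
      rw [show ps.drop (a+1) = [] from by rw [List.drop_eq_nil_iff]; omega]
      simp [pvJoin]
    · have hcond : ((a : Int) ≠ (ps.length : Int) - 1) := by omega
      rw [if_pos hcond]
      rw [show ((a : Int) + 1) = ((a + 1 : Nat) : Int) from by omega]
      rw [ih (a+1) _ (by omega)]
      rw [List.drop_eq_getElem_cons halt]
      obtain ⟨y, r, hyr⟩ : ∃ y r, ps.drop (a+1) = y :: r := by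
        cases h : ps.drop (a+1) with
        | nil => rw [List.drop_eq_nil_iff] at h; omega
        | cons y r => exact ⟨y, r, rfl⟩
      rw [hyr]
      simp only [pvJoin, Option.getD_some]
      rw [String.append_assoc, String.append_assoc, String.append_assoc]

theorem pv_main (colors : String) :
    generate_colors_string_py colors = generate_colors_string_py_alt colors := by
  rw [← String.toList_inj]
  have hB : (generate_colors_string_py_alt colors).toList = pvSubst colors.toList := by
    rw [generate_colors_string_py_alt, PySem.Str.toList_replace]
    exact pv_replace_eq colors.toList
  rw [hB]
  by_cases hc : colors = ""
  · subst hc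
    simp [generate_colors_string_py, pvSubst, PySem.List.pyRange_one_eq_nil]
  · have hps : (if colors ≠ "" then (PySem.Str.split? colors ",").getD [] else [])
        = (pvSplit colors.toList).map String.ofList := by
      rw [if_pos hc]
      simp [PySem.Str.split?, PySem.Chars.split?, pv_splitOn_eq]
    rw [generate_colors_string_py]
    simp only [hps]
    rw [show (0 : Int) = ((0 : Nat) : Int) from rfl]
    rw [pv_loopA _ ((pvSplit colors.toList).map String.ofList).length 0 "" (by omega)]
    rw [List.drop_zero, String.empty_append, pvJoin_toList]
    rw [List.map_map]
    rw [show (String.toList ∘ String.ofList) = id from funext (fun l => String.toList_ofList)]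
    rw [List.map_id]
    exact pv_intercalate_split colors.toList

-- ===== VERDICT (by name: the statement is the Claim_ definition above) =====
theorem generate_colors_string_py_spec : Claim_equal_generate_colors_string_py := by
  intro colors _
  unfold Spec_generate_colors_string_py
  exact pv_main colors
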